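-- pv_equiv track=rewrite | github.com/Gaelic-Algorithmic-Research-Group/Gaelic-Text-Normaliser | resources/gd_analyser_pipeline/seg.py | w_segment1
-- ===== SOURCE A (Python) =====
-- def w_segment1(string):
--     string2 = []
--     i = 0
--     while i < len(string):
--         if string[i:i+2] == '^^':
--             i = i + 1
--         else:
--             string2.append(string[i])
--             i = i + 1
--     return(''.join(string2))
-- ===== SOURCE B (Python) =====
-- import re
--
-- def w_segment1(string):
--     # Collapse every maximal run of carets into a single caret in one regex pass.
--     return re.sub(r'\^+', '^', string)
-- ===== Notes on version B (the rewrite author's own statement) =====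
-- stated objective: simpler
-- what changed: The manual index-skip while loop is replaced by a single regex substitution that collapses each maximal caret run to one caret.
import Mathlib
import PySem

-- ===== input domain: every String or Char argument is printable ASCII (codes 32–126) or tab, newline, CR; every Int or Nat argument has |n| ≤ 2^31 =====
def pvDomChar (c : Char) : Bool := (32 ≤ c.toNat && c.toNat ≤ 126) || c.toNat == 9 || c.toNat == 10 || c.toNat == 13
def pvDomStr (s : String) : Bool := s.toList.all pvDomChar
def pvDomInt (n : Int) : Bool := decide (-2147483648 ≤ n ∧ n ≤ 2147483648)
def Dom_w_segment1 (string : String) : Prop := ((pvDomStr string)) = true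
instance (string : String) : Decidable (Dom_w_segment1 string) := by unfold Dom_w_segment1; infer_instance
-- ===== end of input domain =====

-- B replaces A's index-skip while loop with a single run-collapsing pass (regex \^+ -> '^'); objective: simpler.

-- ===== PORT A =====
-- A's while loop: at position i, if the 2-char slice is "^^" skip the char, else emit it.
-- On List Char, the slice string[i:i+2] == "^^" holds iff the current and next char are both '^'.
def w_segment1_go : List Char → List Char
  | [] => []
  | [c] => [c]
  | c :: d :: rest =>
      if c = '^' ∧ d = '^' then w_segment1_go (d :: rest)
      else c :: w_segment1_go (d :: rest)

def w_segment1 (string : String) : String :=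
  String.mk (w_segment1_go string.toList)

-- ===== PORT B =====
-- re.sub(r'\^+', '^', s): each maximal run of '^' is matched and replaced by a single '^'.
def w_segment1_alt_go : List Char → List Char
  | [] => []
  | c :: rest =>
      if c = '^' then '^' :: w_segment1_alt_go (rest.dropWhile (· = '^'))
      else c :: w_segment1_alt_go rest
termination_by l => l.length
decreasing_by
  · have := List.length_dropWhile_le (· = '^') rest
    simp; omega
  · simp

def w_segment1_alt (string : String) : String :=
  String.mk (w_segment1_alt_go string.toList)

-- ===== PRECONDITION & SPEC =====
def Spec_w_segment1 (string : String) (out : String) : Prop := out = w_segment1_alt string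
instance (string : String) (out : String) : Decidable (Spec_w_segment1 string out) := by unfold Spec_w_segment1; infer_instance

-- ===== CLAIM (what is proved, stated in full; the proofs are below) =====
def Claim_equal_w_segment1 : Prop := ∀ (string : String), Dom_w_segment1 string → Spec_w_segment1 string (w_segment1 string)

-- ===== LEMMAS AND PROOFS =====

theorem w_segment1_go_eq_alt : ∀ (l : List Char), w_segment1_go l = w_segment1_alt_go l := by
  intro l
  induction h : l.length using Nat.strong_induction_on generalizing l with
  | _ n IH =>
    subst h
    match l with
    | [] => simp [w_segment1_go, w_segment1_alt_go]
    | [c] =>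
      by_cases hc : c = '^' <;> simp [w_segment1_go, w_segment1_alt_go, hc]
    | c :: d :: rest =>
      by_cases hc : c = '^'
      · by_cases hd : d = '^'
        · subst hc; subst hd
          rw [show w_segment1_go ('^' :: '^' :: rest) = w_segment1_go ('^' :: rest) by
                simp [w_segment1_go]]
          rw [IH ('^' :: rest).length (by simp) ('^' :: rest) rfl]
          simp [w_segment1_alt_go, List.dropWhile]
        · subst hc
          rw [show w_segment1_go ('^' :: d :: rest) = '^' :: w_segment1_go (d :: rest) by
                simp [w_segment1_go, hd]]
          rw [IH (d :: rest).length (by simp) (d :: rest) rfl]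
          simp [w_segment1_alt_go, List.dropWhile, hd]
      · rw [show w_segment1_go (c :: d :: rest) = c :: w_segment1_go (d :: rest) by
              simp [w_segment1_go, hc]]
        rw [IH (d :: rest).length (by simp) (d :: rest) rfl]
        simp [w_segment1_alt_go, hc]

-- ===== VERDICT (by name: the statement is the Claim_ definition above) =====
theorem w_segment1_spec : Claim_equal_w_segment1 := by
  intro s _
  unfold Spec_w_segment1 w_segment1 w_segment1_alt
  rw [w_segment1_go_eq_alt]
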